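-- pv_equiv track=rewrite | github.com/Lab25A-CS/Appunti-Triennale | SecondoAnno/ASD/Modulo1/Algoritmi/Esercitazioni/strisciaDiMezzo.py | strisciaDiMezzo
-- ===== SOURCE A (Python) =====
-- def contaDestra(L):
--     n = len(L) - 1
--     i, t = 0, 0
--     A = []
--
--     while i <= n:
--         if L[i] < 0:
--             break
--         A.append(None)
--         i += 1
--
--     while i <= n:
--         if L[i] < 0:
--             t = 0
--         else:
--             t += L[i]
--         A.append(t)
--         i += 1
--     return A
--
-- def contaSinistra(L):
--     n = len(L) - 1
--     i, t = n, 0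
--     B = [0]*len(L)
--
--     while i >= 0:
--         if L[i] < 0:
--             break
--         B[i] = None
--         i -= 1
--
--     while i >= 0:
--         if L[i] < 0:
--             t = 0
--
--         else:
--             t += L[i]
--
--         B[i] = t
--         i -= 1
--
--     return B
--
-- def strisciaDiMezzo (L):
--     A = contaDestra(L)
--     B = contaSinistra(L)
--     C = []
--     n, x = len(L) - 1, 0
--
--     for x in range(len(L)):
--         if B[x] == None:
--             C.append(A[x])
--         elif A[x] == None:
--             C.append(B[x])
--         elif B[x] < A[x]:
--             C.append(B[x])
--         else:
--             C.append(A[x])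
--
--     return C
-- ===== SOURCE B (Python) =====
-- def strisciaDiMezzo(L):
--     # Split L into the maximal non-negative segments separated by negatives,
--     # then emit each segment's answers from its own boundary sums, with 0 at
--     # each negative position.
--     segs = []
--     cur = []
--     for v in L:
--         if v < 0:
--             segs.append(cur)
--             cur = []
--         else:
--             cur.append(v)
--     segs.append(cur)
--     m = len(segs)
--     out = []
--     for k, seg in enumerate(segs):
--         has_left = k > 0          # a negative bounds the segment on the left
--         has_right = k < m - 1     # a negative bounds it on the right
--         if has_left and has_right:
--             suf = []
--             s = 0
--             for v in reversed(seg):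
--                 s += v
--                 suf.append(s)
--             suf.reverse()
--             t = 0
--             piece = []
--             for v, sv in zip(seg, suf):
--                 t += v
--                 piece.append(min(t, sv))
--         elif has_left:
--             t = 0
--             piece = []
--             for v in seg:
--                 t += v
--                 piece.append(t)
--         elif has_right:
--             piece = []
--             s = 0
--             for v in reversed(seg):
--                 s += v
--                 piece.append(s)
--             piece.reverse()
--         else:
--             piece = [None] * len(seg)
--         out.extend(piece)
--         if has_right:
--             out.append(0)
--     return out
-- ===== Notes on version B (the rewrite author's own statement) =====
-- stated objective: alternative
-- what changed: Instead of A's three whole-array passes (left running sums, right running sums, then an index-by-index merge), B splits L once into maximal non-negative segments at the negative positions and computes each output segment locally from its own prefix/suffix boundary sums, appending 0 at each negative.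
import Mathlib
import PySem

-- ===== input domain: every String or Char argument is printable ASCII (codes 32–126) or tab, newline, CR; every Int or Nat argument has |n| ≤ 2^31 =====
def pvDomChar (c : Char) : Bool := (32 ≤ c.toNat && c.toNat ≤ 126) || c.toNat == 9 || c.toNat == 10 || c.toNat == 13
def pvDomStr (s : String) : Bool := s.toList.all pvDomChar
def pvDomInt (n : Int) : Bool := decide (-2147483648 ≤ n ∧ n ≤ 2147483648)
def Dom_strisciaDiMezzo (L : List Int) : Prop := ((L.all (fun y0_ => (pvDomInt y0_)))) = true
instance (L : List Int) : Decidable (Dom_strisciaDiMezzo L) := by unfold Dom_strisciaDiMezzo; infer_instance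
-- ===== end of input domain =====

-- B replaces A's three whole-array prefix/suffix passes by a single split of L into
-- maximal non-negative segments between negatives, answering each segment from its own
-- boundary sums (objective: alternative decomposition, same O(n) cost).

-- ===== PORT A =====
-- second while loop of contaDestra: running sum t, reset to 0 at a negative
def pvPhase2 : List Int → Int → List (Option Int)
  | [], _ => []
  | v :: xs, t =>
    let t' := if v < 0 then 0 else t + v
    some t' :: pvPhase2 xs t'

-- first while loop of contaDestra: None until the first negative, then break into phase 2
def pvPhase1 : List Int → List (Option Int)
  | [] => []
  | v :: xs => if v < 0 then pvPhase2 (v :: xs) 0 else none :: pvPhase1 xs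

def contaDestra (L : List Int) : List (Option Int) := pvPhase1 L

-- contaSinistra runs the same two loop bodies right-to-left over L and writes B back
-- into position: exactly phase1/phase2 on the reversed list, result reversed (exact).
def contaSinistra (L : List Int) : List (Option Int) := (pvPhase1 L.reverse).reverse

-- body of A's merging for-loop: match on B[x] first, then A[x], then compare
def pvCombine (a b : Option Int) : Option Int :=
  match b with
  | none => a
  | some bv =>
    match a with
    | none => some bv
    | some av => if bv < av then some bv else some av

-- A indexes A[x], B[x] for x in range(len L); both have length L.length, ported as zipWith (exact)
def strisciaDiMezzo (L : List Int) : List (Option Int) :=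
  List.zipWith pvCombine (contaDestra L) (contaSinistra L)

-- ===== PORT B =====
-- Source B's splitting loop: maximal non-negative segments separated by negatives
def pvSplitNeg : List Int → List (List Int)
  | [] => [[]]
  | v :: xs =>
    if v < 0 then [] :: pvSplitNeg xs
    else
      match pvSplitNeg xs with
      | [] => [[v]]          -- unreachable: pvSplitNeg never returns []
      | s :: rest => (v :: s) :: rest

-- Source B's left-to-right running sums of a segment (accumulator t)
def pvPref : List Int → Int → List Int
  | [], _ => []
  | v :: xs, t => (t + v) :: pvPref xs (t + v)

-- Source B's suffix sums: accumulate over reversed(seg), then reverse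
def pvSuf (seg : List Int) : List Int := (pvPref seg.reverse 0).reverse

-- Source B's per-segment piece, by which negative boundaries exist
def pvPiece (seg : List Int) (hl hr : Bool) : List (Option Int) :=
  if hl && hr then List.zipWith (fun t s => some (min t s)) (pvPref seg 0) (pvSuf seg)
  else if hl then (pvPref seg 0).map some
  else if hr then (pvSuf seg).map some
  else seg.map fun _ => none

-- Source B's output loop: pieces concatenated, a 0 after every segment but the last
def pvJoin : List (List Int) → Bool → List (Option Int)
  | [], _ => []
  | [seg], hl => pvPiece seg hl false
  | seg :: s :: rest, hl => pvPiece seg hl true ++ some 0 :: pvJoin (s :: rest) true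

def strisciaDiMezzo_alt (L : List Int) : List (Option Int) :=
  pvJoin (pvSplitNeg L) false

-- ===== PRECONDITION & SPEC =====
def Spec_strisciaDiMezzo (L : List Int) (out : List (Option Int)) : Prop := out = strisciaDiMezzo_alt L
instance (L : List Int) (out : List (Option Int)) : Decidable (Spec_strisciaDiMezzo L out) := by unfold Spec_strisciaDiMezzo; infer_instance

-- ===== CLAIM (what is proved, stated in full; the proofs are below) =====
def Claim_equal_strisciaDiMezzo : Prop := ∀ (L : List Int), Dom_strisciaDiMezzo L → Spec_strisciaDiMezzo L (strisciaDiMezzo L)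

-- ===== LEMMAS AND PROOFS =====

-- proof-side representations of contaDestra/contaSinistra over the segment split
def pvF (seg : List Int) : List (Option Int) := some 0 :: (pvPref seg 0).map some

def pvDRep : List (List Int) → List (Option Int)
  | [] => []
  | s :: rest => (s.map fun _ => none) ++ rest.flatMap pvF

def pvPrefRep : List (List Int) → Int → List (Option Int)
  | [], _ => []
  | s :: rest, t => (pvPref s t).map some ++ rest.flatMap pvF

def pvSRep : List (List Int) → List (Option Int)
  | [] => []
  | [s] => s.map fun _ => none
  | s :: s' :: rest => (pvSuf s).map some ++ some 0 :: pvSRep (s' :: rest)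

theorem pvSplitNeg_ne (xs : List Int) : ∃ s rest, pvSplitNeg xs = s :: rest := by
  induction xs with
  | nil => exact ⟨[], [], rfl⟩
  | cons v xs ih =>
    obtain ⟨s, rest, h⟩ := ih
    by_cases hv : v < 0
    · exact ⟨[], pvSplitNeg xs, by simp [pvSplitNeg, hv]⟩
    · exact ⟨v :: s, rest, by simp [pvSplitNeg, hv, h]⟩

theorem pvPref_length (s : List Int) : ∀ t, (pvPref s t).length = s.length := by
  induction s with
  | nil => intro t; rfl
  | cons v xs ih => intro t; simp [pvPref, ih]

theorem pvSuf_length (s : List Int) : (pvSuf s).length = s.length := by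
  simp [pvSuf, pvPref_length]

theorem phase2_eq (xs : List Int) : ∀ t, pvPhase2 xs t = pvPrefRep (pvSplitNeg xs) t := by
  induction xs with
  | nil => intro t; rfl
  | cons v xs ih =>
    intro t
    by_cases hv : v < 0
    · simp only [pvPhase2, pvSplitNeg, hv]
      obtain ⟨s, rest, h⟩ := pvSplitNeg_ne xs
      simp [pvPrefRep, h, pvF, ih 0, pvPref]
    · obtain ⟨s, rest, h⟩ := pvSplitNeg_ne xs
      simp only [pvPhase2, pvSplitNeg, hv, h]
      simp [pvPrefRep, ih (t + v), h, pvPref]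

theorem phase1_eq (xs : List Int) : pvPhase1 xs = pvDRep (pvSplitNeg xs) := by
  induction xs with
  | nil => rfl
  | cons v xs ih =>
    by_cases hv : v < 0
    · obtain ⟨s, rest, h⟩ := pvSplitNeg_ne xs
      simp only [pvPhase1, hv, if_pos, pvSplitNeg]
      rw [pvPhase2]
      simp only [hv, if_pos]
      rw [phase2_eq xs 0, h]
      simp [pvDRep, pvPrefRep, pvF]
    · obtain ⟨s, rest, h⟩ := pvSplitNeg_ne xs
      simp only [pvPhase1, pvSplitNeg, hv, h, ih]
      simp [pvDRep]

-- splitting commutes with a trailing negative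
theorem splitNeg_append_neg (v : Int) (hv : v < 0) :
    ∀ ys : List Int, pvSplitNeg (ys ++ [v]) = pvSplitNeg ys ++ [[]] := by
  intro ys
  induction ys with
  | nil => simp [pvSplitNeg, hv]
  | cons u ys ih =>
    by_cases hu : u < 0
    · simp [pvSplitNeg, hu, ih]
    · obtain ⟨s, rest, h⟩ := pvSplitNeg_ne ys
      simp [pvSplitNeg, hu, ih, h]

-- splitting commutes with a trailing non-negative (it joins the last segment)
theorem splitNeg_append_nonneg (v : Int) (hv : ¬ v < 0) :
    ∀ (zs : List Int) (q : List (List Int)) (w : List Int),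
      pvSplitNeg zs = q ++ [w] → pvSplitNeg (zs ++ [v]) = q ++ [w ++ [v]] := by
  intro zs
  induction zs with
  | nil =>
    intro q w h
    have h' : q ++ [w] = [[]] := by
      rw [← h]; rfl
    cases q with
    | nil =>
      simp at h'
      subst h'
      simp [pvSplitNeg, hv]
    | cons x q' =>
      exfalso
      have := congrArg List.length h'
      simp at this
  | cons u zs ih =>
    intro q w h
    by_cases hu : u < 0
    · rw [show pvSplitNeg (u :: zs) = [] :: pvSplitNeg zs from by simp [pvSplitNeg, hu]] at h
      cases q with
      | nil =>
        exfalso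
        simp at h
        obtain ⟨s, rest, hs⟩ := pvSplitNeg_ne zs
        rw [hs] at h; cases h.2
      | cons x q' =>
        simp at h
        obtain ⟨hx, h2⟩ := h
        rw [show ((u :: zs) ++ [v]) = u :: (zs ++ [v]) from rfl,
          show pvSplitNeg (u :: (zs ++ [v])) = [] :: pvSplitNeg (zs ++ [v]) from by
            simp [pvSplitNeg, hu]]
        rw [ih q' w h2, hx]
        simp
    · obtain ⟨s, rest, hs⟩ := pvSplitNeg_ne zs
      rw [show pvSplitNeg (u :: zs) = (u :: s) :: rest from by simp [pvSplitNeg, hu, hs]] at h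
      cases q with
      | nil =>
        simp at h
        obtain ⟨h1, h2⟩ := h
        -- h1 : u :: s = w, h2 : rest = []
        have hzs : pvSplitNeg zs = [] ++ [s] := by simp [hs, h2]
        have h3 := ih [] s hzs
        rw [show ((u :: zs) ++ [v]) = u :: (zs ++ [v]) from rfl]
        have h4 : pvSplitNeg (u :: (zs ++ [v])) = (u :: (s ++ [v])) :: [] := by
          simp [pvSplitNeg, hu, h3]
        rw [h4, ← h1]
        simp
      | cons x q' =>
        simp at h
        obtain ⟨h1, h2⟩ := h
        -- h1 : u :: s = x, h2 : rest = q' ++ [w]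
        have hzs : pvSplitNeg zs = (s :: q') ++ [w] := by simp [hs, h2]
        have h3 := ih (s :: q') w hzs
        rw [show ((u :: zs) ++ [v]) = u :: (zs ++ [v]) from rfl]
        have h4 : pvSplitNeg (u :: (zs ++ [v])) = (u :: s) :: (q' ++ [w ++ [v]]) := by
          simp [pvSplitNeg, hu, h3]
        rw [h4, ← h1]
        simp

theorem splitNeg_reverse (xs : List Int) :
    pvSplitNeg xs.reverse = ((pvSplitNeg xs).map List.reverse).reverse := by
  induction xs with
  | nil => rfl
  | cons v xs ih =>
    by_cases hv : v < 0
    · simp only [List.reverse_cons, pvSplitNeg, hv]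
      rw [splitNeg_append_neg v hv, ih]
      simp
    · obtain ⟨s, rest, h⟩ := pvSplitNeg_ne xs
      simp only [List.reverse_cons, pvSplitNeg, hv, h]
      have hrev : pvSplitNeg xs.reverse = (rest.map List.reverse).reverse ++ [s.reverse] := by
        rw [ih, h]; simp
      rw [splitNeg_append_nonneg v hv xs.reverse _ _ hrev]
      simp

theorem pvDRep_append_singleton (x : List Int) (l : List (List Int)) (b : List Int) :
    pvDRep ((x :: l) ++ [b]) = pvDRep (x :: l) ++ pvF b := by
  simp [pvDRep, List.flatMap_append]

theorem pvDRep_rev (rest : List (List Int)) : ∀ s : List Int,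
    (pvDRep (((s :: rest).map List.reverse).reverse)).reverse = pvSRep (s :: rest) := by
  induction rest with
  | nil =>
    intro s
    simp [pvDRep, pvSRep]
  | cons s' rest' ih =>
    intro s
    obtain ⟨a, as, ha⟩ : ∃ a as, ((s' :: rest').map List.reverse).reverse = a :: as := by
      cases hrev : ((s' :: rest').map List.reverse).reverse with
      | nil => exact absurd (congrArg List.length hrev) (by simp)
      | cons a as => exact ⟨a, as, rfl⟩
    have : (((s :: s' :: rest').map List.reverse).reverse)
        = (a :: as) ++ [s.reverse] := by
      simp [← ha]
    rw [this, pvDRep_append_singleton]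
    have hsuf : ((pvPref s.reverse 0).map some).reverse = (pvSuf s).map some := by
      simp [pvSuf]
    calc (pvDRep (a :: as) ++ pvF s.reverse).reverse
        = (pvF s.reverse).reverse ++ (pvDRep (a :: as)).reverse := by simp
      _ = (pvSuf s).map some ++ some 0 :: pvSRep (s' :: rest') := by
          rw [← ha, ih s']
          simp [pvF, hsuf]
      _ = pvSRep (s :: s' :: rest') := by rfl

-- zipWith lemmas for pvCombine
theorem zc_none_none (s : List Int) :
    List.zipWith pvCombine (s.map fun _ => none) (s.map fun _ => none)
      = s.map fun _ => (none : Option Int) := by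
  induction s with
  | nil => rfl
  | cons v xs ih =>
    simp only [List.map_cons, List.zipWith_cons_cons]
    rw [show pvCombine (none : Option Int) none = none from rfl, ih]

theorem zc_none_some (xs : List Int) : ∀ ys : List Int, xs.length = ys.length →
    List.zipWith pvCombine (xs.map fun _ => none) (ys.map some) = ys.map some := by
  induction xs with
  | nil =>
    intro ys h
    cases ys with
    | nil => rfl
    | cons y ys => simp at h
  | cons v xs ih =>
    intro ys h
    cases ys with
    | nil => simp at h
    | cons y ys =>
      simp only [List.map_cons, List.zipWith_cons_cons]
      rw [show pvCombine none (some y) = some y from rfl, ih ys (by simpa using h)]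

theorem zc_some_none (xs : List Int) : ∀ ys : List Int, xs.length = ys.length →
    List.zipWith pvCombine (xs.map some) (ys.map fun _ => none) = xs.map some := by
  induction xs with
  | nil => intro ys h; simp
  | cons v xs ih =>
    intro ys h
    cases ys with
    | nil => simp at h
    | cons y ys =>
      simp only [List.map_cons, List.zipWith_cons_cons]
      rw [show pvCombine (some v) none = some v from rfl, ih ys (by simpa using h)]

theorem zc_some_some (xs : List Int) : ∀ ys : List Int,
    List.zipWith pvCombine (xs.map some) (ys.map some)
      = List.zipWith (fun t s => some (min t s)) xs ys := by
  induction xs with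
  | nil => intro ys; simp
  | cons v xs ih =>
    intro ys
    cases ys with
    | nil => simp
    | cons y ys =>
      simp only [List.map_cons, List.zipWith_cons_cons, ih ys]
      congr 1
      simp only [pvCombine]
      split_ifs with h
      · simp [min_eq_right (le_of_lt h)]
      · simp [min_eq_left (by omega : v ≤ y)]

-- the tail of the merge, after the first negative
theorem zip_tail (rest : List (List Int)) : ∀ s : List Int,
    List.zipWith pvCombine ((pvPref s 0).map some ++ rest.flatMap pvF) (pvSRep (s :: rest))
      = pvJoin (s :: rest) true := by
  induction rest with
  | nil =>
    intro s
    simp only [List.flatMap_nil, List.append_nil, pvSRep, pvJoin, pvPiece]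
    simpa using zc_some_none (pvPref s 0) s (by simp [pvPref_length])
  | cons s' rest' ih =>
    intro s
    have hlen : ((pvPref s 0).map some).length = ((pvSuf s).map some).length := by
      simp [pvPref_length, pvSuf_length]
    calc List.zipWith pvCombine ((pvPref s 0).map some ++ (s' :: rest').flatMap pvF)
          (pvSRep (s :: s' :: rest'))
        = List.zipWith pvCombine ((pvPref s 0).map some ++ (pvF s' ++ rest'.flatMap pvF))
          ((pvSuf s).map some ++ some 0 :: pvSRep (s' :: rest')) := by rfl
      _ = List.zipWith pvCombine ((pvPref s 0).map some) ((pvSuf s).map some)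
          ++ List.zipWith pvCombine (pvF s' ++ rest'.flatMap pvF) (some 0 :: pvSRep (s' :: rest')) := by
          rw [List.zipWith_append hlen]
      _ = pvPiece s true true ++ some 0 :: pvJoin (s' :: rest') true := by
          rw [zc_some_some]
          simp only [pvF, List.cons_append, List.zipWith_cons_cons]
          rw [show pvCombine (some 0) (some 0) = some 0 by rfl]
          rw [ih s']
          simp [pvPiece]
      _ = pvJoin (s :: s' :: rest') true := by rfl

theorem zip_main (segs : List (List Int)) (s : List Int) (rest : List (List Int))
    (h : segs = s :: rest) :
    List.zipWith pvCombine (pvDRep segs) (pvSRep segs) = pvJoin segs false := by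
  subst h
  cases rest with
  | nil =>
    simp only [pvDRep, pvSRep, pvJoin, pvPiece, List.flatMap_nil, List.append_nil]
    simpa using zc_none_none s
  | cons s' rest' =>
    have hlen : ((s.map fun _ => (none : Option Int))).length = ((pvSuf s).map some).length := by
      simp [pvSuf_length]
    calc List.zipWith pvCombine (pvDRep (s :: s' :: rest')) (pvSRep (s :: s' :: rest'))
        = List.zipWith pvCombine ((s.map fun _ => none) ++ (pvF s' ++ rest'.flatMap pvF))
          ((pvSuf s).map some ++ some 0 :: pvSRep (s' :: rest')) := by rfl
      _ = List.zipWith pvCombine (s.map fun _ => none) ((pvSuf s).map some)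
          ++ List.zipWith pvCombine (pvF s' ++ rest'.flatMap pvF) (some 0 :: pvSRep (s' :: rest')) := by
          rw [List.zipWith_append hlen]
      _ = pvPiece s false true ++ some 0 :: pvJoin (s' :: rest') true := by
          rw [zc_none_some s (pvSuf s) (by simp [pvSuf_length])]
          simp only [pvF, List.cons_append, List.zipWith_cons_cons]
          rw [show pvCombine (some 0) (some 0) = some 0 by rfl]
          rw [zip_tail rest' s']
          simp [pvPiece]
      _ = pvJoin (s :: s' :: rest') false := by rfl

theorem contaSinistra_eq (L : List Int) : contaSinistra L = pvSRep (pvSplitNeg L) := by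
  obtain ⟨s, rest, h⟩ := pvSplitNeg_ne L
  unfold contaSinistra
  rw [phase1_eq, splitNeg_reverse, h, pvDRep_rev rest s]

-- ===== VERDICT (by name: the statement is the Claim_ definition above) =====
theorem strisciaDiMezzo_spec : Claim_equal_strisciaDiMezzo := by
  intro L _
  unfold Spec_strisciaDiMezzo strisciaDiMezzo strisciaDiMezzo_alt contaDestra
  obtain ⟨s, rest, h⟩ := pvSplitNeg_ne L
  rw [phase1_eq, contaSinistra_eq, zip_main (pvSplitNeg L) s rest h]
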